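-- pv_equiv track=rewrite | github.com/fcpratik/Cross-Lingual_Relation_Extraction | Q3/icl_inference.py | closest_label
-- ===== SOURCE A (Python) =====
-- def closest_label(gen,valid):
--     g=gen.strip().split("\n")[0].strip()
--     if g in valid:return g
--     if g.lower() in["na","none",""]:return"NA"
--     for l in valid:
--         if l.lower()==g.lower():return l
--     for l in valid:
--         if l in g:return l
--     for l in valid:
--         if g in l and len(g)>3:return l
--     gp=g.strip("/").split("/")
--     best,bsc=None,0
--     for l in valid:
--         lp=l.strip("/").split("/")
--         sc=sum(1 for a,b in zip(reversed(gp),reversed(lp)) if a.lower()==b.lower())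
--         if sc>bsc:bsc=sc;best=l
--     if best and bsc>0:return best
--     return"NA"
-- ===== SOURCE B (Python) =====
-- def closest_label(gen, valid):
--     g = gen.strip().split("\n")[0].strip()
--     if g in valid:
--         return g
--     if g.lower() in ("na", "none", ""):
--         return "NA"
--     glow = g.lower()
--     rgp = list(reversed(g.strip("/").split("/")))
--     best = None  # (cls, score, label); smaller class wins, class-3 ties by strictly greater score
--     for l in valid:
--         if l.lower() == glow:
--             cand = (0, 0, l)
--         elif l in g:
--             cand = (1, 0, l)
--         elif g in l and len(g) > 3:
--             cand = (2, 0, l)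
--         else:
--             sc = sum(a.lower() == b.lower()
--                      for a, b in zip(rgp, reversed(l.strip("/").split("/"))))
--             cand = (3, sc, l) if sc > 0 else None
--         if cand is not None and (best is None or cand[0] < best[0]
--                                  or (cand[0] == 3 and best[0] == 3 and cand[1] > best[1])):
--             best = cand
--     return best[2] if best is not None else "NA"
-- ===== Notes on version B (the rewrite author's own statement) =====
-- stated objective: alternative
-- what changed: A's five sequential scans over valid (exact membership, NA guard, case-insensitive equality, l-in-g, g-in-l, suffix-overlap fold) are replaced by the two pre-checks plus a single pass that classifies each label into a match class (0=lowercase-equal, 1=l in g, 2=g in l with len(g)>3, 3=positive suffix-overlap score) and folds to the overall winner, breaking ties by earliest index for classes 0-2 and by strictly greater score within class 3.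
import Mathlib
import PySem

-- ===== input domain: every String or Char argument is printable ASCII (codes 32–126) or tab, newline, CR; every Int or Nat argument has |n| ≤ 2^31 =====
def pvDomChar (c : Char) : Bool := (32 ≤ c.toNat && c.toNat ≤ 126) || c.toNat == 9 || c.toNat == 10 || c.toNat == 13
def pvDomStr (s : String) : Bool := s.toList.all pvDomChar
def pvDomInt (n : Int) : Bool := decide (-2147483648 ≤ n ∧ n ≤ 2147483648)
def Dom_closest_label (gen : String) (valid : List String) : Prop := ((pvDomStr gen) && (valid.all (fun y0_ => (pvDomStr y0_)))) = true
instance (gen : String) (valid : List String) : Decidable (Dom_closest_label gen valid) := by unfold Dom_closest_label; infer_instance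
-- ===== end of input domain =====

-- B replaces A's five separate scans over `valid` with one classifying pass; objective: alternative (one pass instead of five scans).

-- ===== PORT A =====
-- shared normalization: gen.strip().split("\n")[0].strip()
def pvNorm (gen : String) : String :=
  PySem.Str.strip (((PySem.Str.split? (PySem.Str.strip gen) "\n").getD []).headD "")

-- g.strip("/").split("/")
def pvGp (g : String) : List String :=
  (PySem.Str.split? (PySem.Str.stripChars g "/") "/").getD []

-- sum(1 for a,b in zip(reversed(gp),reversed(lp)) if a.lower()==b.lower())
def pvScore (gp lp : List String) : Nat :=
  (gp.reverse.zip lp.reverse).countP (fun p => PySem.Str.lower p.1 == PySem.Str.lower p.2)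

-- one iteration of A's last loop: 'if sc>bsc: bsc=sc; best=l'
def pvAstep (gp : List String) (st : Option String × Nat) (l : String) : Option String × Nat :=
  if st.2 < pvScore gp (pvGp l) then (some l, pvScore gp (pvGp l)) else st

def closest_label (gen : String) (valid : List String) : String :=
  let g := pvNorm gen
  if valid.contains g then g
  else if (["na", "none", ""] : List String).contains (PySem.Str.lower g) then "NA"
  else match valid.find? (fun l => PySem.Str.lower l == PySem.Str.lower g) with
  | some l => l
  | none => match valid.find? (fun l => PySem.Str.isIn l g) with
    | some l => l
    | none => match valid.find? (fun l => PySem.Str.isIn g l && decide (3 < PySem.Str.len g)) with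
      | some l => l
      | none =>
        let r := valid.foldl (pvAstep (pvGp g)) (none, 0)
        match r.1 with
        | some best => if best ≠ "" ∧ 0 < r.2 then best else "NA"  -- Python truthiness: 'if best and bsc>0'
        | none => "NA"

-- ===== PORT B =====
-- candidate class for one label: some (class, score); none = no match
def pvCand (g : String) (gp : List String) (l : String) : Option (Nat × Nat) :=
  if PySem.Str.lower l == PySem.Str.lower g then some (0, 0)
  else if PySem.Str.isIn l g then some (1, 0)
  else if PySem.Str.isIn g l && decide (3 < PySem.Str.len g) then some (2, 0)
  else if 0 < pvScore gp (pvGp l) then some (3, pvScore gp (pvGp l)) else none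

-- keep the better of the running best and this label's candidate
def pvStep (g : String) (gp : List String) (st : Option (Nat × Nat × String)) (l : String) :
    Option (Nat × Nat × String) :=
  match pvCand g gp l with
  | none => st
  | some (c, sc) =>
    match st with
    | none => some (c, sc, l)
    | some (bc, bsc, bl) =>
        if c < bc ∨ (c = 3 ∧ bc = 3 ∧ bsc < sc) then some (c, sc, l) else some (bc, bsc, bl)

def closest_label_alt (gen : String) (valid : List String) : String :=
  let g := pvNorm gen
  if valid.contains g then g
  else if (["na", "none", ""] : List String).contains (PySem.Str.lower g) then "NA"
  else match valid.foldl (pvStep g (pvGp g)) none with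
  | some (_, _, l) => l
  | none => "NA"

-- ===== PRECONDITION & SPEC =====
def Spec_closest_label (gen : String) (valid : List String) (out : String) : Prop := out = closest_label_alt gen valid
instance (gen : String) (valid : List String) (out : String) : Decidable (Spec_closest_label gen valid out) := by unfold Spec_closest_label; infer_instance

-- ===== CLAIM (what is proved, stated in full; the proofs are below) =====
def Claim_equal_closest_label : Prop := ∀ (gen : String) (valid : List String), Dom_closest_label gen valid → Spec_closest_label gen valid (closest_label gen valid)

-- ===== LEMMAS AND PROOFS =====

-- the state B's fold reaches, expressed through A's three find?s and A's score-fold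
def pvEncode (f0 f1 f2 : Option String) (r : Option String × Nat) : Option (Nat × Nat × String) :=
  match f0 with
  | some l => some (0, 0, l)
  | none => match f1 with
    | some l => some (1, 0, l)
    | none => match f2 with
      | some l => some (2, 0, l)
      | none => match r.1 with
        | some b => some (3, r.2, b)
        | none => none

theorem pvAstep_eq (gp : List String) (st : Option String × Nat) (l : String) :
    pvAstep gp st l = if st.2 < pvScore gp (pvGp l) then (some l, pvScore gp (pvGp l)) else st := rfl

theorem pvStep_eq (g : String) (gp : List String) (st : Option (Nat × Nat × String)) (l : String) :
    pvStep g gp st l =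
      match pvCand g gp l with
      | none => st
      | some (c, sc) =>
        match st with
        | none => some (c, sc, l)
        | some (bc, bsc, bl) =>
            if c < bc ∨ (c = 3 ∧ bc = 3 ∧ bsc < sc) then some (c, sc, l) else some (bc, bsc, bl) := rfl

theorem pvAfold_snd_pos (gp : List String) (valid : List String) :
    ∀ b, (valid.foldl (pvAstep gp) (none, 0)).1 = some b →
      0 < (valid.foldl (pvAstep gp) (none, 0)).2 := by
  induction valid using List.reverseRecOn with
  | nil => simp
  | append_singleton v l ih =>
    intro b h
    rw [List.foldl_append, List.foldl_cons, List.foldl_nil, pvAstep_eq] at h ⊢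
    split at h
    · next hc => rw [if_pos hc]; exact Nat.lt_of_le_of_lt (Nat.zero_le _) hc
    · next hc => rw [if_neg hc]; exact ih b h

theorem pvAfold_fst_mem (gp : List String) (valid : List String) :
    ∀ b, (valid.foldl (pvAstep gp) (none, 0)).1 = some b → b ∈ valid := by
  induction valid using List.reverseRecOn with
  | nil => simp
  | append_singleton v l ih =>
    intro b h
    rw [List.foldl_append, List.foldl_cons, List.foldl_nil, pvAstep_eq] at h
    split at h
    · simp at h; simp [h]
    · exact List.mem_append_left _ (ih b h)

theorem pvAfold_none_snd (gp : List String) (valid : List String) :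
    (valid.foldl (pvAstep gp) (none, 0)).1 = none → (valid.foldl (pvAstep gp) (none, 0)).2 = 0 := by
  induction valid using List.reverseRecOn with
  | nil => simp
  | append_singleton v l ih =>
    intro h
    rw [List.foldl_append, List.foldl_cons, List.foldl_nil, pvAstep_eq] at h ⊢
    split at h
    · simp at h
    · next hc => rw [if_neg hc]; exact ih h

set_option maxHeartbeats 1000000 in
theorem pvMaster (g : String) (gp : List String) (valid : List String) :
    valid.foldl (pvStep g gp) none =
      pvEncode (valid.find? (fun l => PySem.Str.lower l == PySem.Str.lower g))
        (valid.find? (fun l => PySem.Str.isIn l g))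
        (valid.find? (fun l => PySem.Str.isIn g l && decide (3 < PySem.Str.len g)))
        (valid.foldl (pvAstep gp) (none, 0)) := by
  induction valid using List.reverseRecOn with
  | nil => rfl
  | append_singleton v l ih =>
    have hpos := pvAfold_snd_pos gp v
    have hzero := pvAfold_none_snd gp v
    rw [List.foldl_append, List.foldl_cons, List.foldl_nil, ih,
        List.find?_append, List.find?_append, List.find?_append,
        List.foldl_append, List.foldl_cons, List.foldl_nil, List.find?_singleton,
        List.find?_singleton, List.find?_singleton]
    rw [pvStep_eq, pvAstep_eq]
    unfold pvCand
    generalize pvScore gp (pvGp l) = sc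
    generalize hA : List.foldl (pvAstep gp) (none, 0) v = r at hpos hzero ⊢
    generalize hF0 : v.find? (fun l => PySem.Str.lower l == PySem.Str.lower g) = f0
    generalize hF1 : v.find? (fun l => PySem.Str.isIn l g) = f1
    generalize hF2 : v.find? (fun l => PySem.Str.isIn g l && decide (3 < PySem.Str.len g)) = f2
    clear hA hF0 hF1 hF2 ih
    rcases f0 with _ | l0 <;>
      rcases f1 with _ | l1 <;>
        rcases f2 with _ | l2 <;>
          rcases r with ⟨_ | b, bsc⟩ <;>
            by_cases b0 : (PySem.Str.lower l == PySem.Str.lower g) = true <;>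
              by_cases b1 : PySem.Str.isIn l g = true <;>
                by_cases b2 : (PySem.Str.isIn g l && decide (3 < PySem.Str.len g)) = true <;>
                  simp only [b0, b1, b2, pvEncode, if_true,
                    Option.or_some, Option.some_or, Option.none_or] <;>
                  first
                    | rfl
                    | (split_ifs <;> simp_all)

theorem pvEmpty_isIn (g : String) : PySem.Str.isIn "" g = true := by
  rw [PySem.Str.isIn_iff_infix]; simp

theorem closest_label_spec : Claim_equal_closest_label := by
  intro gen valid _
  unfold Spec_closest_label closest_label closest_label_alt
  simp only []
  by_cases hmem : valid.contains (pvNorm gen) = true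
  · rw [if_pos hmem, if_pos hmem]
  · rw [if_neg hmem, if_neg hmem]
    by_cases hna : (["na", "none", ""] : List String).contains (PySem.Str.lower (pvNorm gen)) = true
    · rw [if_pos hna, if_pos hna]
    · rw [if_neg hna, if_neg hna, pvMaster]
      rcases h0 : valid.find? (fun l => PySem.Str.lower l == PySem.Str.lower (pvNorm gen)) with _ | l0 <;>
        rcases h1 : valid.find? (fun l => PySem.Str.isIn l (pvNorm gen)) with _ | l1 <;>
          rcases h2 : valid.find? (fun l => PySem.Str.isIn (pvNorm gen) l && decide (3 < PySem.Str.len (pvNorm gen))) with _ | l2 <;>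
            (simp only [pvEncode]; try rfl)
      -- remaining: all find?s none; compare A's final match with B's class-3 outcome
      rcases hr : (valid.foldl (pvAstep (pvGp (pvNorm gen))) (none, 0)) with ⟨_ | b, bsc⟩
      · rfl
      · have hb : b ∈ valid := pvAfold_fst_mem _ _ b (by rw [hr])
        have hpos : 0 < bsc := by
          have := pvAfold_snd_pos (pvGp (pvNorm gen)) valid b (by rw [hr])
          rwa [hr] at this
        have hne : b ≠ "" := by
          intro hb0
          have := List.find?_eq_none.mp h1 b hb
          rw [hb0] at this
          exact this (pvEmpty_isIn _)
        simp [hne, hpos]
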